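-- pv_equiv track=rewrite | github.com/bitsofbits/advent_of_code | 2024/day_07/python/implementation.py | possible_answers
-- ===== SOURCE A (Python) =====
-- def possible_answers(values, max_value):
--     if len(values) == 1:
--         return set(values)
--     initial = possible_answers(values[:-1], max_value)
--     result = set()
--     v1 = values[-1]
--     for x in initial:
--         y = v1 + x
--         if y <= max_value:
--             result.add(y)
--         y = v1 * x
--         if y <= max_value:
--             result.add(y)
--     return result
-- ===== SOURCE B (Python) =====
-- def possible_answers(values, max_value):
--     current = {values[0]}
--     for v in values[1:]:
--         current = {y for x in current for y in (v + x, v * x) if y <= max_value}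
--     return current
-- ===== Notes on version B (the rewrite author's own statement) =====
-- stated objective: simpler
-- what changed: Replaces the recursion on values[:-1] with a single forward loop that maintains the set of reachable values, building each next set with a set comprehension.
import Mathlib
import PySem

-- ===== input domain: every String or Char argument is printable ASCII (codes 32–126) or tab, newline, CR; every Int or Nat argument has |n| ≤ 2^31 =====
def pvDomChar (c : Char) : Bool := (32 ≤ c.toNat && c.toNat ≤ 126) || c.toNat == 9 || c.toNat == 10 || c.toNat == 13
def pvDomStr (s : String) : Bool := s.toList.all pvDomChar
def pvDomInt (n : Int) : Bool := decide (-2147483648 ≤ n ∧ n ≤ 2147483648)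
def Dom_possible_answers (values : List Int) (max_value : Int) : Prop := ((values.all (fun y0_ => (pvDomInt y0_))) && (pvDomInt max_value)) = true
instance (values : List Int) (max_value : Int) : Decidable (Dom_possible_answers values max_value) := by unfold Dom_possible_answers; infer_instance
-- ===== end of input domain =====

-- ===== PORT A =====
-- B replaces A's recursion on values[:-1] by a forward loop over the list (objective: simpler);
-- both raise on the empty list (A: RecursionError, B: IndexError), excluded by Pre_.
theorem pv_slice_len_lt {values : List Int} (h : values ≠ []) :
    (PySem.List.slice values none (some (-1))).length < values.length := by
  rw [PySem.List.slice_to_neg_one]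
  have : values.length ≠ 0 := fun hc => h (List.length_eq_zero_iff.mp hc)
  simp [List.length_dropLast]; omega

def possible_answers (values : List Int) (max_value : Int) : List Int :=
  if values.length = 1 then PySem.Set.ofList values
  else
    if h : values = [] then
      []  -- Python recurses forever here (empty list, excluded by Pre_)
    else
      let initial := possible_answers (PySem.List.slice values none (some (-1))) max_value
      let v1 := PySem.List.pyGetD values (-1) 0
      initial.foldl (fun result x =>
        let result := if v1 + x ≤ max_value then PySem.Set.add result (v1 + x) else result
        if v1 * x ≤ max_value then PySem.Set.add result (v1 * x) else result)
        PySem.Set.empty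
termination_by values.length
decreasing_by exact pv_slice_len_lt h

-- ===== PORT B =====
def possible_answers_alt (values : List Int) (max_value : Int) : List Int :=
  match values with
  | [] => []  -- Python raises IndexError here (values[0]), excluded by Pre_
  | v0 :: rest =>
    rest.foldl (fun current v =>
      current.foldl (fun acc x =>
        let acc := if v + x ≤ max_value then PySem.Set.add acc (v + x) else acc
        if v * x ≤ max_value then PySem.Set.add acc (v * x) else acc)
        PySem.Set.empty)
      (PySem.Set.ofList [v0])

-- ===== PRECONDITION & SPEC =====
-- Pre_ excludes only the empty list, on which A raises RecursionError (infinite recursion).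
def Pre_possible_answers (values : List Int) (max_value : Int) : Prop := values ≠ []
instance (values : List Int) (max_value : Int) : Decidable (Pre_possible_answers values max_value) := by unfold Pre_possible_answers; infer_instance
def pvWitness_possible_answers : List Int × Int := ([2, 3, 4], 20)
def Spec_possible_answers (values : List Int) (max_value : Int) (out : List Int) : Prop := out = possible_answers_alt values max_value
instance (values : List Int) (max_value : Int) (out : List Int) : Decidable (Spec_possible_answers values max_value out) := by unfold Spec_possible_answers; infer_instance

-- ===== CLAIM (what is proved, stated in full; the proofs are below) =====
def Claim_equal_possible_answers : Prop := ∀ (values : List Int) (max_value : Int), Dom_possible_answers values max_value → Pre_possible_answers values max_value → Spec_possible_answers values max_value (possible_answers values max_value)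

-- ===== LEMMAS AND PROOFS =====
-- one transformation step (the shared inner loop shape), used only to state the proofs below
def pvStep (max_value : Int) (s : List Int) (v : Int) : List Int :=
  s.foldl (fun acc x =>
    let acc := if v + x ≤ max_value then PySem.Set.add acc (v + x) else acc
    if v * x ≤ max_value then PySem.Set.add acc (v * x) else acc)
    PySem.Set.empty

theorem pv_alt_concat (v0 : Int) (rest : List Int) (x : Int) (max_value : Int) :
    possible_answers_alt (v0 :: (rest ++ [x])) max_value
      = pvStep max_value (possible_answers_alt (v0 :: rest) max_value) x := by
  simp [possible_answers_alt, List.foldl_append, pvStep]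

theorem pv_A_concat (ys : List Int) (x : Int) (max_value : Int) (h : ys ≠ []) :
    possible_answers (ys ++ [x]) max_value
      = pvStep max_value (possible_answers ys max_value) x := by
  rw [possible_answers]
  have hlen : (ys ++ [x]).length ≠ 1 := by
    simp; intro hc; exact h hc
  have hne : ys ++ [x] ≠ [] := by simp
  rw [if_neg hlen, dif_neg hne]
  rw [PySem.List.slice_to_neg_one, List.dropLast_concat,
      PySem.List.pyGetD_neg_one_append_singleton]
  rfl

theorem pv_equal (values : List Int) (max_value : Int) (h : values ≠ []) :
    possible_answers values max_value = possible_answers_alt values max_value := by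
  induction values using List.reverseRecOn with
  | nil => exact absurd rfl h
  | append_singleton ys x ih =>
    rcases ys with _ | ⟨y0, yr⟩
    · rw [possible_answers]
      simp [possible_answers_alt]
    · rw [pv_A_concat _ _ _ (by simp), show y0 :: yr ++ [x] = y0 :: (yr ++ [x]) from rfl,
          pv_alt_concat, ih (by simp)]

-- ===== VERDICT (by name: the statement is the Claim_ definition above) =====
theorem possible_answers_spec : Claim_equal_possible_answers := by
  intro values max_value _ hpre
  exact pv_equal values max_value hpre
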